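-- pv_equiv track=rewrite | github.com/RACCHUS/LicensePlateInformation | src/utils/image_manager.py | _generate_usage_notes
-- ===== SOURCE A (Python) =====
-- def _generate_usage_notes(category, subcategory, tags):
--     """Generate usage notes based on category and tags"""
--     notes = []
--
--     if category == 'plates':
--         notes.append("Use for plate type identification and pattern validation")
--         if subcategory == 'passenger':
--             notes.append("Standard passenger plate reference")
--         elif subcategory == 'specialty':
--             notes.append("Specialty plate with unique design elements")
--
--     elif category == 'characters':
--         notes.append("Character recognition training and validation")
--         if subcategory == 'ambiguous':
--             notes.append("Critical for O/0, I/1, S/5, B/8 disambiguation")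
--         elif subcategory == 'damaged':
--             notes.append("Examples of damaged or unclear characters")
--
--     elif category == 'stickers':
--         notes.append("Registration sticker identification and color validation")
--         if subcategory in ['month', 'year']:
--             notes.append("Date validation and expiration checking")
--
--     elif category == 'processing':
--         notes.append("Processing rule validation and algorithm training")
--         if subcategory == 'stacked_chars':
--             notes.append("Determine if stacked characters should be omitted or included")
--         elif subcategory == 'slanted_text':
--             notes.append("Handle slanted or angled text processing")
--
--     if tags:
--         for tag in tags:
--             if tag in ['O_vs_0', 'I_vs_1', 'S_vs_5', 'B_vs_8']:
--                 notes.append(f"Specifically addresses {tag} character confusion")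
--             elif tag in ['stacked', 'slanted']:
--                 notes.append(f"Example of {tag} text layout requiring special handling")
--
--     return notes
-- ===== SOURCE B (Python) =====
-- # Declarative rule scan: the function is a filter of a flat (predicate, note)
-- # rule list plus a comprehension over tags x tag-rules; no branching, no accumulator.
--
-- _RULES = [
--     (lambda c, s: c == 'plates', "Use for plate type identification and pattern validation"),
--     (lambda c, s: c == 'plates' and s == 'passenger', "Standard passenger plate reference"),
--     (lambda c, s: c == 'plates' and s == 'specialty', "Specialty plate with unique design elements"),
--     (lambda c, s: c == 'characters', "Character recognition training and validation"),
--     (lambda c, s: c == 'characters' and s == 'ambiguous', "Critical for O/0, I/1, S/5, B/8 disambiguation"),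
--     (lambda c, s: c == 'characters' and s == 'damaged', "Examples of damaged or unclear characters"),
--     (lambda c, s: c == 'stickers', "Registration sticker identification and color validation"),
--     (lambda c, s: c == 'stickers' and s in ('month', 'year'), "Date validation and expiration checking"),
--     (lambda c, s: c == 'processing', "Processing rule validation and algorithm training"),
--     (lambda c, s: c == 'processing' and s == 'stacked_chars', "Determine if stacked characters should be omitted or included"),
--     (lambda c, s: c == 'processing' and s == 'slanted_text', "Handle slanted or angled text processing"),
-- ]
--
-- _TAG_RULES = [
--     (('O_vs_0', 'I_vs_1', 'S_vs_5', 'B_vs_8'), "Specifically addresses {} character confusion"),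
--     (('stacked', 'slanted'), "Example of {} text layout requiring special handling"),
-- ]
--
--
-- def _generate_usage_notes(category, subcategory, tags):
--     """Generate usage notes by scanning a flat declarative rule list."""
--     return ([note for cond, note in _RULES if cond(category, subcategory)]
--             + [tpl.format(tag)
--                for tag in (tags or [])
--                for keys, tpl in _TAG_RULES if tag in keys])
-- ===== Notes on version B (the rewrite author's own statement) =====
-- stated objective: alternative
-- what changed: Replaced the imperative accumulator with nested if/elif dispatch by a pure filter over one flat declarative (predicate, note) rule list, concatenated with a tags x tag-rules comprehension; there is no mutable notes list and no branching in the function body.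
import Mathlib
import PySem

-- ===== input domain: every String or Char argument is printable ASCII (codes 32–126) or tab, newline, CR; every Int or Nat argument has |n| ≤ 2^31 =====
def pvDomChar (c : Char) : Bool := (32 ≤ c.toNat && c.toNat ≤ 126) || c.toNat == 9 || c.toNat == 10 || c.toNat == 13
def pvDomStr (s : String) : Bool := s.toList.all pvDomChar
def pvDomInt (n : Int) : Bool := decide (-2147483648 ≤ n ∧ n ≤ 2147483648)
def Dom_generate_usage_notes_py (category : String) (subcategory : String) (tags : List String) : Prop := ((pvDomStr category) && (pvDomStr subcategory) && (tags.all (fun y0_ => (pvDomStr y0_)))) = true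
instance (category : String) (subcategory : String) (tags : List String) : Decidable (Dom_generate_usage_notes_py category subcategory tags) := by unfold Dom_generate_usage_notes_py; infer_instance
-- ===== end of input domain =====

-- B replaces A's imperative accumulator with nested if/elif dispatch by a pure
-- filter of one flat declarative (predicate, note) rule list plus a tags × tag-rules
-- comprehension; same outputs (alternative decomposition, same cost).

-- ===== PORT A =====
-- literal transliteration of A: notes built by the same if/elif chain, then the tags loop
def generate_usage_notes_py (category : String) (subcategory : String) (tags : List String) : List String :=
  let notes : List String := []
  let notes :=
    if category == "plates" then
      let notes := notes ++ ["Use for plate type identification and pattern validation"]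
      if subcategory == "passenger" then
        notes ++ ["Standard passenger plate reference"]
      else if subcategory == "specialty" then
        notes ++ ["Specialty plate with unique design elements"]
      else notes
    else if category == "characters" then
      let notes := notes ++ ["Character recognition training and validation"]
      if subcategory == "ambiguous" then
        notes ++ ["Critical for O/0, I/1, S/5, B/8 disambiguation"]
      else if subcategory == "damaged" then
        notes ++ ["Examples of damaged or unclear characters"]
      else notes
    else if category == "stickers" then
      let notes := notes ++ ["Registration sticker identification and color validation"]
      if subcategory ∈ ["month", "year"] then
        notes ++ ["Date validation and expiration checking"]
      else notes
    else if category == "processing" then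
      let notes := notes ++ ["Processing rule validation and algorithm training"]
      if subcategory == "stacked_chars" then
        notes ++ ["Determine if stacked characters should be omitted or included"]
      else if subcategory == "slanted_text" then
        notes ++ ["Handle slanted or angled text processing"]
      else notes
    else notes
  -- 'if tags:' then 'for tag in tags: …'
  if tags ≠ [] then
    tags.foldl (fun notes tag =>
      if tag ∈ ["O_vs_0", "I_vs_1", "S_vs_5", "B_vs_8"] then
        notes ++ ["Specifically addresses " ++ tag ++ " character confusion"]
      else if tag ∈ ["stacked", "slanted"] then
        notes ++ ["Example of " ++ tag ++ " text layout requiring special handling"]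
      else notes) notes
  else notes

-- ===== PORT B =====
-- the flat (predicate, note) rule list of Source B (_RULES)
def pvRules : List ((String → String → Bool) × String) :=
  [ (fun c _ => c == "plates", "Use for plate type identification and pattern validation"),
    (fun c s => c == "plates" && s == "passenger", "Standard passenger plate reference"),
    (fun c s => c == "plates" && s == "specialty", "Specialty plate with unique design elements"),
    (fun c _ => c == "characters", "Character recognition training and validation"),
    (fun c s => c == "characters" && s == "ambiguous", "Critical for O/0, I/1, S/5, B/8 disambiguation"),
    (fun c s => c == "characters" && s == "damaged", "Examples of damaged or unclear characters"),
    (fun c _ => c == "stickers", "Registration sticker identification and color validation"),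
    (fun c s => c == "stickers" && (s == "month" || s == "year"), "Date validation and expiration checking"),
    (fun c _ => c == "processing", "Processing rule validation and algorithm training"),
    (fun c s => c == "processing" && s == "stacked_chars", "Determine if stacked characters should be omitted or included"),
    (fun c s => c == "processing" && s == "slanted_text", "Handle slanted or angled text processing") ]

-- the tag rule list of Source B (_TAG_RULES); each template 'pre {} post' is the pair (pre, post)
def pvTagRules : List (List String × (String × String)) :=
  [ (["O_vs_0", "I_vs_1", "S_vs_5", "B_vs_8"], ("Specifically addresses ", " character confusion")),
    (["stacked", "slanted"], ("Example of ", " text layout requiring special handling")) ]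

-- Source B: filter of _RULES ++ comprehension over (tags or []) × _TAG_RULES
def generate_usage_notes_py_alt (category : String) (subcategory : String) (tags : List String) : List String :=
  (pvRules.filter (fun r => r.1 category subcategory)).map (fun r => r.2)
  ++ ((if tags = [] then [] else tags).flatMap (fun tag =>       -- '(tags or [])'
        pvTagRules.filterMap (fun r =>
          if tag ∈ r.1 then some (r.2.1 ++ tag ++ r.2.2) else none)))

-- ===== PRECONDITION & SPEC =====
def Spec_generate_usage_notes_py (category : String) (subcategory : String) (tags : List String) (out : List String) : Prop := out = generate_usage_notes_py_alt category subcategory tags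
instance (category : String) (subcategory : String) (tags : List String) (out : List String) : Decidable (Spec_generate_usage_notes_py category subcategory tags out) := by unfold Spec_generate_usage_notes_py; infer_instance

-- ===== CLAIM =====
def Claim_equal_generate_usage_notes_py : Prop := ∀ (category : String) (subcategory : String) (tags : List String), Dom_generate_usage_notes_py category subcategory tags → Spec_generate_usage_notes_py category subcategory tags (generate_usage_notes_py category subcategory tags)

-- ===== LEMMAS AND PROOFS =====

-- A's per-tag branch produces exactly B's per-tag rule scan (0 or 1 note)
lemma pv_tag_step_eq (tag : String) :
    (fun (notes : List String) =>
      if tag ∈ ["O_vs_0", "I_vs_1", "S_vs_5", "B_vs_8"] then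
        notes ++ ["Specifically addresses " ++ tag ++ " character confusion"]
      else if tag ∈ ["stacked", "slanted"] then
        notes ++ ["Example of " ++ tag ++ " text layout requiring special handling"]
      else notes) =
    (fun (notes : List String) =>
      notes ++ pvTagRules.filterMap (fun r =>
        if tag ∈ r.1 then some (r.2.1 ++ tag ++ r.2.2) else none)) := by
  funext notes
  by_cases h1 : tag ∈ ["O_vs_0", "I_vs_1", "S_vs_5", "B_vs_8"]
  · have h2 : tag ∉ (["stacked", "slanted"] : List String) := by
      simp only [List.mem_cons, List.not_mem_nil, or_false] at h1
      rcases h1 with h | h | h | h <;> subst h <;> decide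
    simp [pvTagRules, List.filterMap, h1, h2]
  · by_cases h2 : tag ∈ (["stacked", "slanted"] : List String)
    · simp [pvTagRules, List.filterMap, h1, h2]
    · simp [pvTagRules, List.filterMap, h1, h2]

-- the tags loop (with the 'if tags:' guard) equals prefix ++ flatMap over (tags or [])
lemma pv_tags_eq (tags : List String) (notes : List String) :
    (if tags ≠ [] then
      tags.foldl (fun notes tag =>
        if tag ∈ ["O_vs_0", "I_vs_1", "S_vs_5", "B_vs_8"] then
          notes ++ ["Specifically addresses " ++ tag ++ " character confusion"]
        else if tag ∈ ["stacked", "slanted"] then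
          notes ++ ["Example of " ++ tag ++ " text layout requiring special handling"]
        else notes) notes
    else notes) =
    notes ++ ((if tags = [] then [] else tags).flatMap (fun tag =>
        pvTagRules.filterMap (fun r =>
          if tag ∈ r.1 then some (r.2.1 ++ tag ++ r.2.2) else none))) := by
  by_cases h : tags = []
  · simp [h]
  · simp only [h, ne_eq, not_false_iff, if_true, if_false]
    have hf : (fun (notes : List String) (tag : String) =>
        if tag ∈ ["O_vs_0", "I_vs_1", "S_vs_5", "B_vs_8"] then
          notes ++ ["Specifically addresses " ++ tag ++ " character confusion"]
        else if tag ∈ ["stacked", "slanted"] then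
          notes ++ ["Example of " ++ tag ++ " text layout requiring special handling"]
        else notes) =
        (fun (notes : List String) (tag : String) =>
          notes ++ pvTagRules.filterMap (fun r =>
            if tag ∈ r.1 then some (r.2.1 ++ tag ++ r.2.2) else none)) := by
      funext notes tag
      exact congrFun (pv_tag_step_eq tag) notes
    rw [hf, PySem.List.foldl_append_eq_flatMap]

-- A's if/elif prefix equals B's rule filter
lemma pv_prefix_eq (category subcategory : String) :
    (if category == "plates" then
      let notes := ([] : List String) ++ ["Use for plate type identification and pattern validation"]
      if subcategory == "passenger" then notes ++ ["Standard passenger plate reference"]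
      else if subcategory == "specialty" then notes ++ ["Specialty plate with unique design elements"]
      else notes
    else if category == "characters" then
      let notes := ([] : List String) ++ ["Character recognition training and validation"]
      if subcategory == "ambiguous" then notes ++ ["Critical for O/0, I/1, S/5, B/8 disambiguation"]
      else if subcategory == "damaged" then notes ++ ["Examples of damaged or unclear characters"]
      else notes
    else if category == "stickers" then
      let notes := ([] : List String) ++ ["Registration sticker identification and color validation"]
      if subcategory ∈ ["month", "year"] then notes ++ ["Date validation and expiration checking"]
      else notes
    else if category == "processing" then
      let notes := ([] : List String) ++ ["Processing rule validation and algorithm training"]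
      if subcategory == "stacked_chars" then notes ++ ["Determine if stacked characters should be omitted or included"]
      else if subcategory == "slanted_text" then notes ++ ["Handle slanted or angled text processing"]
      else notes
    else []) =
    (pvRules.filter (fun r => r.1 category subcategory)).map (fun r => r.2) := by
  simp only [pvRules, List.filter]
  by_cases h1 : category = "plates"
  · subst h1
    by_cases s1 : subcategory = "passenger"
    · subst s1; rfl
    · by_cases s2 : subcategory = "specialty"
      · subst s2; rfl
      · have hs1 : (subcategory == "passenger") = false := by simp [s1]
        have hs2 : (subcategory == "specialty") = false := by simp [s2]
        simp [hs1, hs2]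
  · by_cases h2 : category = "characters"
    · subst h2
      by_cases s1 : subcategory = "ambiguous"
      · subst s1; rfl
      · by_cases s2 : subcategory = "damaged"
        · subst s2; rfl
        · have hs1 : (subcategory == "ambiguous") = false := by simp [s1]
          have hs2 : (subcategory == "damaged") = false := by simp [s2]
          simp [hs1, hs2]
    · by_cases h3 : category = "stickers"
      · subst h3
        by_cases s1 : subcategory = "month"
        · subst s1; rfl
        · by_cases s2 : subcategory = "year"
          · subst s2; rfl
          · have hs1 : (subcategory == "month") = false := by simp [s1]
            have hs2 : (subcategory == "year") = false := by simp [s2]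
            simp [hs1, hs2, s1, s2]
      · by_cases h4 : category = "processing"
        · subst h4
          by_cases s1 : subcategory = "stacked_chars"
          · subst s1; rfl
          · by_cases s2 : subcategory = "slanted_text"
            · subst s2; rfl
            · have hs1 : (subcategory == "stacked_chars") = false := by simp [s1]
              have hs2 : (subcategory == "slanted_text") = false := by simp [s2]
              simp [hs1, hs2]
        · have hc1 : (category == "plates") = false := by simp [h1]
          have hc2 : (category == "characters") = false := by simp [h2]
          have hc3 : (category == "stickers") = false := by simp [h3]
          have hc4 : (category == "processing") = false := by simp [h4]
          simp [hc1, hc2, hc3, hc4]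

-- ===== VERDICT =====
theorem generate_usage_notes_py_spec : Claim_equal_generate_usage_notes_py := by
  intro category subcategory tags _
  unfold Spec_generate_usage_notes_py
  refine (pv_tags_eq tags _).trans ?_
  exact congrArg
    (fun l => l ++ ((if tags = [] then [] else tags).flatMap (fun tag =>
      pvTagRules.filterMap (fun r =>
        if tag ∈ r.1 then some (r.2.1 ++ tag ++ r.2.2) else none))))
    (pv_prefix_eq category subcategory)
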